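-- pv_equiv track=rewrite | github.com/Fondamenti18/fondamenti-di-programmazione | students/1793731/homework04/program01.py | recFunc4
-- ===== SOURCE A (Python) =====
-- def recFunc4(ygrado,jsonInDict,index,jsonOutDict, livello=0):
--     for nodo in jsonInDict[index]:
--         grado=len(jsonInDict[index])
--         if grado!=ygrado:
--             recFunc4(ygrado,jsonInDict,nodo,jsonOutDict,livello)
--         else:
--             livello=livello+1
--             recFunc4(ygrado,jsonInDict,nodo,jsonOutDict,livello)
--             livello=livello-1
--     ls=jsonOutDict.keys()
--     if index not in ls:
--         jsonOutDict[index]=livello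
--     return jsonOutDict
-- ===== SOURCE B (Python) =====
-- # Iterative post-order DFS with an explicit stack of (node, level, finished) frames;
-- # the entry level is carried on the frame, so the +1/-1 restore of A disappears.
-- # Mutates jsonOutDict in place and returns it, like A.
-- def recFunc4(ygrado, jsonInDict, index, jsonOutDict, livello=0):
--     stack = [(index, livello, False)]
--     while stack:
--         node, lv, done = stack.pop()
--         if done:
--             if node not in jsonOutDict:
--                 jsonOutDict[node] = lv
--         else:
--             children = jsonInDict[node]
--             child_lv = lv + 1 if len(children) == ygrado else lv
--             stack.append((node, lv, True))
--             for c in reversed(children):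
--                 stack.append((c, child_lv, False))
--     return jsonOutDict
-- ===== Notes on version B (the rewrite author's own statement) =====
-- stated objective: alternative
-- what changed: A's recursion is replaced by an iterative post-order DFS over an explicit stack of (node, level, finished) frames that carries the entry level, so the +1/-1 level restore and the call stack disappear; same child order and first-finish-wins assignment.
import Mathlib
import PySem

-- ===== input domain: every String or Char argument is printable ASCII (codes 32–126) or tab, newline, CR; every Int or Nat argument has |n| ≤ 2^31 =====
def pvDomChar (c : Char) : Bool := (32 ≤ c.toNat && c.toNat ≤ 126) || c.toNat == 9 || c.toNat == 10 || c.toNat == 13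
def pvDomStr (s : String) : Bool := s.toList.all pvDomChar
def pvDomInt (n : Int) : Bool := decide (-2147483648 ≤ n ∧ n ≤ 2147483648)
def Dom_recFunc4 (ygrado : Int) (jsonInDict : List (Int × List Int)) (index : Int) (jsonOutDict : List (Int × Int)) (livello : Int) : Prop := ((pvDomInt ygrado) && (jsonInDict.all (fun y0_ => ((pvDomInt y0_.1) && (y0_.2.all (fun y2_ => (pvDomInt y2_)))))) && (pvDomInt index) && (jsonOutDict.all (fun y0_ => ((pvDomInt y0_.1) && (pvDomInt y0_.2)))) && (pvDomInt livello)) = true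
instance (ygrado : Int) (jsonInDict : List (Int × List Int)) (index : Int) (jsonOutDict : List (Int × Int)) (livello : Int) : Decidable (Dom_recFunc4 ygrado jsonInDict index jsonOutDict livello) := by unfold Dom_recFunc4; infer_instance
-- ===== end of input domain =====

-- B replaces A's recursion by an iterative post-order DFS over an explicit stack of
-- (node, level, finished) frames carrying the entry level (objective: alternative
-- decomposition; same asymptotic cost). Both A and B mutate jsonOutDict in place in
-- Python; the equivalence proved here is about the returned dict (the same object).

-- Python dict lookup on an association list: first match (exact; a Python dict has unique keys).
def pvGet? (g : List (Int × List Int)) (k : Int) : Option (List Int) :=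
  match g with
  | [] => none
  | (a, v) :: t => if a = k then some v else pvGet? t k

-- ===== PORT A =====
-- the body of A's for-loop, carrying the mutable state (jsonOutDict, livello);
-- `rec` is the recursive call with one unit of fuel less; Option.bind propagates the
-- exception (none) exactly as Python unwinds it
def loopA (ygrado : Int) (grado : Int)
    (rec : Int → List (Int × Int) → Int → Option (List (Int × Int))) :
    List Int → List (Int × Int) → Int → Option (List (Int × Int) × Int)
  | [], d, l => some (d, l)
  | nodo :: rest, d, l =>
    if grado ≠ ygrado then
      (rec nodo d l).bind (fun d2 => loopA ygrado grado rec rest d2 l)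
    else
      -- livello = livello + 1; recurse; livello = livello - 1
      (rec nodo d (l + 1)).bind (fun d2 => loopA ygrado grado rec rest d2 (l + 1 - 1))

-- A's recursion, fuel-bounded (Python raises RecursionError/KeyError where this is none;
-- such inputs are excluded by Pre_recFunc4). jsonOutDict[index]=livello on a fresh key appends.
def goA (ygrado : Int) (g : List (Int × List Int)) :
    Nat → Int → List (Int × Int) → Int → Option (List (Int × Int))
  | 0, _, _, _ => none
  | f + 1, index, d, l =>
    (pvGet? g index).bind (fun cs =>   -- KeyError when none; grado = len(jsonInDict[index])
      (loopA ygrado (Int.ofNat cs.length) (fun n d' l' => goA ygrado g f n d' l') cs d l).bind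
        (fun p => some (if (p.1.map (·.1)).contains index then p.1 else p.1 ++ [(index, p.2)])))

-- fuel bound used by both ports (more than any possible acyclic recursion depth)
def pvN (g : List (Int × List Int)) : Nat :=
  (g.map (fun p => p.2.length)).sum + g.length.succ.succ.succ

def recFunc4 (ygrado : Int) (jsonInDict : List (Int × List Int)) (index : Int) (jsonOutDict : List (Int × Int)) (livello : Int) : List (Int × Int) :=
  (goA ygrado jsonInDict (pvN jsonInDict + 1) index jsonOutDict livello).getD jsonOutDict

-- ===== PORT B =====
-- B's while-loop over the explicit stack (head = top); one fuel unit per pop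
def goB (ygrado : Int) (g : List (Int × List Int)) :
    Nat → List (Int × Int × Bool) → List (Int × Int) → Option (List (Int × Int))
  | _, [], d => some d
  | 0, _ :: _, _ => none
  | f + 1, (node, lv, done) :: rest, d =>
    if done then
      goB ygrado g f rest (if (d.map (·.1)).contains node then d else d ++ [(node, lv)])
    else
      (pvGet? g node).bind (fun children =>   -- KeyError when none
        -- push (node, lv, True), then the children reversed (head of the list = top of stack)
        goB ygrado g f
          (children.reverse.foldl
            (fun st c => (c, (if Int.ofNat children.length = ygrado then lv + 1 else lv), false) :: st)
            ((node, lv, true) :: rest)) d)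

def pvMaxLen (g : List (Int × List Int)) : Nat := (g.map (fun p => p.2.length)).foldr max 0

-- fuel bound for the stack loop (≥ the number of pops of a full acyclic DFS)
def pvFuelB (g : List (Int × List Int)) : Nat := (pvMaxLen g + 2) ^ (pvN g + 1)

def recFunc4_alt (ygrado : Int) (jsonInDict : List (Int × List Int)) (index : Int) (jsonOutDict : List (Int × Int)) (livello : Int) : List (Int × Int) :=
  (goB ygrado jsonInDict (pvFuelB jsonInDict) [(index, livello, false)] jsonOutDict).getD jsonOutDict

-- ===== PRECONDITION & SPEC =====
-- adjacency for the precondition, via the library association lookup (= first match)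
def pvAdj (g : List (Int × List Int)) (n : Int) : List Int := (g.lookup n).getD []
def pvStep (g : List (Int × List Int)) (s : Finset Int) : Finset Int :=
  s ∪ s.biUnion (fun n => (pvAdj g n).toFinset)
def pvReach (g : List (Int × List Int)) (i : Int) : Finset Int := (pvStep g)^[pvN g] {i}
def pvPeel (g : List (Int × List Int)) (s : Finset Int) : Finset Int :=
  s.filter (fun n => (pvAdj g n).any (fun c => decide (c ∈ s)))

-- Pre_ excludes exactly the inputs on which the Python A raises: a node reachable from
-- index that is not a key of jsonInDict (KeyError), or a cycle reachable from index
-- (unbounded recursion, RecursionError). A returns on every other input.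
def Pre_recFunc4 (ygrado : Int) (jsonInDict : List (Int × List Int)) (index : Int) (jsonOutDict : List (Int × Int)) (livello : Int) : Prop :=
  pvReach jsonInDict index ⊆ (jsonInDict.map (·.1)).toFinset ∧
  (pvPeel jsonInDict)^[pvN jsonInDict] (pvReach jsonInDict index) = ∅
instance (ygrado : Int) (jsonInDict : List (Int × List Int)) (index : Int) (jsonOutDict : List (Int × Int)) (livello : Int) : Decidable (Pre_recFunc4 ygrado jsonInDict index jsonOutDict livello) := by unfold Pre_recFunc4; infer_instance

def pvWitness_recFunc4 : Int × (List (Int × List Int)) × Int × (List (Int × Int)) × Int :=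
  (2, [(0, [1, 2]), (1, []), (2, [1])], 0, [], 0)

def Spec_recFunc4 (ygrado : Int) (jsonInDict : List (Int × List Int)) (index : Int) (jsonOutDict : List (Int × Int)) (livello : Int) (out : List (Int × Int)) : Prop := out = recFunc4_alt ygrado jsonInDict index jsonOutDict livello
instance (ygrado : Int) (jsonInDict : List (Int × List Int)) (index : Int) (jsonOutDict : List (Int × Int)) (livello : Int) (out : List (Int × Int)) : Decidable (Spec_recFunc4 ygrado jsonInDict index jsonOutDict livello out) := by unfold Spec_recFunc4; infer_instance

-- ===== CLAIM (what is proved, stated in full; the proofs are below) =====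
def Claim_equal_recFunc4 : Prop := ∀ (ygrado : Int) (jsonInDict : List (Int × List Int)) (index : Int) (jsonOutDict : List (Int × Int)) (livello : Int), Dom_recFunc4 ygrado jsonInDict index jsonOutDict livello → Pre_recFunc4 ygrado jsonInDict index jsonOutDict livello → Spec_recFunc4 ygrado jsonInDict index jsonOutDict livello (recFunc4 ygrado jsonInDict index jsonOutDict livello)

-- ===== LEMMAS AND PROOFS =====

-- controlled one-step unfolding lemmas for the ports
theorem goA_zero (y : Int) (g : List (Int × List Int)) (n : Int) (d : List (Int × Int)) (l : Int) :
    goA y g 0 n d l = none := rfl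

theorem goA_succ (y : Int) (g : List (Int × List Int)) (f : Nat) (n : Int) (d : List (Int × Int)) (l : Int) :
    goA y g (f + 1) n d l =
      (pvGet? g n).bind (fun cs =>
        (loopA y (Int.ofNat cs.length) (fun n d' l' => goA y g f n d' l') cs d l).bind
          (fun p => some (if (p.1.map (·.1)).contains n then p.1 else p.1 ++ [(n, p.2)]))) := rfl

theorem loopA_nil (y gr : Int) (rec : Int → List (Int × Int) → Int → Option (List (Int × Int)))
    (d : List (Int × Int)) (l : Int) : loopA y gr rec [] d l = some (d, l) := rfl

theorem loopA_cons (y gr : Int) (rec : Int → List (Int × Int) → Int → Option (List (Int × Int)))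
    (c : Int) (cs : List Int) (d : List (Int × Int)) (l : Int) :
    loopA y gr rec (c :: cs) d l =
      if gr ≠ y then (rec c d l).bind (fun d2 => loopA y gr rec cs d2 l)
      else (rec c d (l + 1)).bind (fun d2 => loopA y gr rec cs d2 (l + 1 - 1)) := rfl

theorem goB_nil (y : Int) (g : List (Int × List Int)) (f : Nat) (d : List (Int × Int)) :
    goB y g f [] d = some d := by cases f <;> rfl

theorem goB_succ (y : Int) (g : List (Int × List Int)) (f : Nat) (node lv : Int) (done : Bool)
    (rest : List (Int × Int × Bool)) (d : List (Int × Int)) :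
    goB y g (f + 1) ((node, lv, done) :: rest) d =
      if done then
        goB y g f rest (if (d.map (·.1)).contains node then d else d ++ [(node, lv)])
      else
        (pvGet? g node).bind (fun children =>
          goB y g f
            (children.reverse.foldl
              (fun st c => (c, (if Int.ofNat children.length = y then lv + 1 else lv), false) :: st)
              ((node, lv, true) :: rest)) d) := rfl

theorem pvGet?_eq_lookup (g : List (Int × List Int)) (n : Int) : pvGet? g n = g.lookup n := by
  induction g with
  | nil => rfl
  | cons p t ih =>
    obtain ⟨a, b⟩ := p
    simp only [pvGet?, List.lookup]
    by_cases h : a = n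
    · simp [h]
    · have : (n == a) = false := by simp [Ne.symm h]
      simp [h, this, ih]

theorem pvGet?_of_mem_keys {g : List (Int × List Int)} {n : Int}
    (h : n ∈ g.map (·.1)) : ∃ cs, pvGet? g n = some cs := by
  induction g with
  | nil => simp at h
  | cons p t ih =>
    by_cases hp : p.1 = n
    · exact ⟨p.2, by simp [pvGet?, hp]⟩
    · have : n ∈ t.map (·.1) := by
        simp at h
        rcases h with h | h
        · exact absurd h.symm hp
        · simpa using h
      obtain ⟨cs, hcs⟩ := ih this
      exact ⟨cs, by simp [pvGet?, hp, hcs]⟩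

theorem pvGet?_mem {g : List (Int × List Int)} {n : Int} {cs : List Int}
    (h : pvGet? g n = some cs) : (n, cs) ∈ g := by
  induction g with
  | nil => simp [pvGet?] at h
  | cons p t ih =>
    obtain ⟨a, b⟩ := p
    simp only [pvGet?] at h
    split_ifs at h with hp
    · subst hp; injection h with h2; subst h2; simp
    · exact List.mem_cons_of_mem _ (ih h)

theorem length_le_pvMaxLen {g : List (Int × List Int)} {n : Int} {cs : List Int}
    (h : (n, cs) ∈ g) : cs.length ≤ pvMaxLen g := by
  induction g with
  | nil => simp at h
  | cons p t ih =>
    simp only [pvMaxLen, List.map_cons, List.foldr_cons]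
    rcases List.mem_cons.mp h with h | h
    · subst h; exact Nat.le_max_left _ _
    · exact le_trans (ih h) (Nat.le_max_right _ _)

theorem foldl_push (cl : Int) : ∀ (cs : List Int) (st : List (Int × Int × Bool)),
    cs.reverse.foldl (fun st c => (c, cl, false) :: st) st
      = cs.map (fun c => (c, cl, false)) ++ st := by
  intro cs
  induction cs with
  | nil => intro st; rfl
  | cons c cs ih =>
    intro st
    simp only [List.reverse_cons, List.foldl_append, List.foldl_cons, List.foldl_nil,
      List.map_cons, List.cons_append]
    rw [ih]

-- ---- reachability ----

theorem subset_pvStep (g : List (Int × List Int)) (s : Finset Int) : s ⊆ pvStep g s :=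
  Finset.subset_union_left

theorem subset_iterate_pvStep (g : List (Int × List Int)) :
    ∀ (k : Nat) (s : Finset Int), s ⊆ (pvStep g)^[k] s := by
  intro k
  induction k with
  | zero => intro s; simp
  | succ k ih =>
    intro s
    rw [Function.iterate_succ_apply']
    exact (ih s).trans (subset_pvStep g _)

theorem mem_adj_mem_flatten {g : List (Int × List Int)} {n c : Int}
    (hc : c ∈ pvAdj g n) : c ∈ (g.map (·.2)).flatten := by
  unfold pvAdj at hc
  rw [← pvGet?_eq_lookup] at hc
  cases hg : pvGet? g n with
  | none => rw [hg] at hc; simp at hc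
  | some cs =>
    rw [hg] at hc; simp at hc
    exact List.mem_flatten.mpr ⟨cs, List.mem_map.mpr ⟨(n, cs), pvGet?_mem hg, rfl⟩, hc⟩

theorem iterate_pvStep_subset (g : List (Int × List Int)) (i : Int) :
    ∀ k, (pvStep g)^[k] {i} ⊆ insert i (g.map (·.2)).flatten.toFinset := by
  intro k
  induction k with
  | zero => simp
  | succ k ih =>
    rw [Function.iterate_succ_apply']
    intro x hx
    rcases Finset.mem_union.mp hx with hx | hx
    · exact ih hx
    · obtain ⟨n, _, hxn⟩ := Finset.mem_biUnion.mp hx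
      have : x ∈ pvAdj g n := List.mem_toFinset.mp hxn
      exact Finset.mem_insert_of_mem (List.mem_toFinset.mpr (mem_adj_mem_flatten this))

theorem card_pvReach_le (g : List (Int × List Int)) (i : Int) (k : Nat) :
    ((pvStep g)^[k] {i}).card ≤ 1 + (g.map (fun p => p.2.length)).sum := by
  have h1 := Finset.card_le_card (iterate_pvStep_subset g i k)
  have h2 : (insert i (g.map (·.2)).flatten.toFinset).card
      ≤ 1 + (g.map (·.2)).flatten.toFinset.card := by
    have := Finset.card_insert_le i (g.map (·.2)).flatten.toFinset
    omega
  have h3 : (g.map (·.2)).flatten.toFinset.card ≤ (g.map (·.2)).flatten.length :=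
    List.toFinset_card_le _
  have h4 : (g.map (·.2)).flatten.length = (g.map (fun p => p.2.length)).sum := by
    rw [List.length_flatten, List.map_map]
    rfl
  omega

theorem pvStep_stab (g : List (Int × List Int)) (i : Int) :
    pvStep g (pvReach g i) = pvReach g i := by
  have key : ∀ j, pvStep g ((pvStep g)^[j] {i}) = (pvStep g)^[j] {i} ∨
      j + 1 ≤ ((pvStep g)^[j] {i}).card := by
    intro j
    induction j with
    | zero => right; simp
    | succ j ih =>
      rcases ih with h | h
      · left; rw [Function.iterate_succ_apply', h, h]
      · by_cases heq : pvStep g ((pvStep g)^[j+1] {i}) = (pvStep g)^[j+1] {i}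
        · exact Or.inl heq
        · right
          by_cases hstj : pvStep g ((pvStep g)^[j] {i}) = (pvStep g)^[j] {i}
          · exfalso
            apply heq
            rw [Function.iterate_succ_apply', hstj, hstj]
          · have hss : (pvStep g)^[j] {i} ⊂ pvStep g ((pvStep g)^[j] {i}) :=
              HasSubset.Subset.ssubset_of_ne (subset_pvStep g _) (fun he => hstj he.symm)
            have := Finset.card_lt_card hss
            rw [Function.iterate_succ_apply']
            omega
  rcases key (pvN g) with h | h
  · exact h
  · exfalso
    have hle := card_pvReach_le g i (pvN g)
    have hN : pvN g = (g.map (fun p => p.2.length)).sum + g.length + 3 := rfl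
    omega

theorem mem_pvReach_of_adj {g : List (Int × List Int)} {i n c : Int}
    (hstep : pvStep g (pvReach g i) = pvReach g i)
    (hn : n ∈ pvReach g i) (hc : c ∈ pvAdj g n) : c ∈ pvReach g i := by
  rw [← hstep]
  exact Finset.mem_union_right _
    (Finset.mem_biUnion.mpr ⟨n, hn, List.mem_toFinset.mpr hc⟩)

theorem mem_pvPeel {g : List (Int × List Int)} {s : Finset Int} {n : Int} :
    n ∈ pvPeel g s ↔ n ∈ s ∧ ∃ c ∈ pvAdj g n, c ∈ s := by
  simp [pvPeel]

-- ---- monotonicity of goA in its fuel ----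

theorem loopA_mono {y gr : Int}
    {rec rec' : Int → List (Int × Int) → Int → Option (List (Int × Int))}
    (h : ∀ n d l r, rec n d l = some r → rec' n d l = some r) :
    ∀ cs d l p, loopA y gr rec cs d l = some p → loopA y gr rec' cs d l = some p := by
  intro cs
  induction cs with
  | nil => intro d l p hp; exact hp
  | cons c cs ih =>
    intro d l p hp
    rw [loopA_cons] at hp ⊢
    split_ifs at hp ⊢ with hgr
    · cases hrec : rec c d l with
      | none => rw [hrec] at hp; simp at hp
      | some d1 =>
        rw [hrec, Option.bind_some] at hp
        rw [h _ _ _ _ hrec, Option.bind_some]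
        exact ih _ _ _ hp
    · cases hrec : rec c d (l + 1) with
      | none => rw [hrec] at hp; simp at hp
      | some d1 =>
        rw [hrec, Option.bind_some] at hp
        rw [h _ _ _ _ hrec, Option.bind_some]
        exact ih _ _ _ hp

theorem goA_mono_succ {y : Int} {g : List (Int × List Int)} :
    ∀ (f : Nat) (n : Int) (d : List (Int × Int)) (l : Int) (r : List (Int × Int)),
      goA y g f n d l = some r → goA y g (f + 1) n d l = some r := by
  intro f
  induction f with
  | zero => intro n d l r h; rw [goA_zero] at h; exact absurd h (by simp)
  | succ f ih =>
    intro n d l r h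
    rw [goA_succ] at h ⊢
    cases hg : pvGet? g n with
    | none => rw [hg] at h; simp at h
    | some cs =>
      rw [hg] at h
      rw [Option.bind_some] at h ⊢
      cases hl : loopA y (Int.ofNat cs.length) (fun n d' l' => goA y g f n d' l') cs d l with
      | none => rw [hl] at h; simp at h
      | some p =>
        rw [hl, Option.bind_some] at h
        rw [loopA_mono (fun n d l r hr => ih n d l r hr) cs d l p hl, Option.bind_some]
        exact h

-- ---- termination of goA on Pre_ inputs ----

theorem loopA_total {y gr : Int}
    {rec : Int → List (Int × Int) → Int → Option (List (Int × Int))} :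
    ∀ (cs : List Int), (∀ c ∈ cs, ∀ d l, ∃ r, rec c d l = some r) →
      ∀ d l, ∃ p, loopA y gr rec cs d l = some p := by
  intro cs
  induction cs with
  | nil => intro _ d l; exact ⟨(d, l), rfl⟩
  | cons c cs ih =>
    intro h d l
    rw [loopA_cons]
    split_ifs with hgr
    · obtain ⟨r, hr⟩ := h c (by simp) d l
      rw [hr, Option.bind_some]
      exact ih (fun c hc => h c (by simp [hc])) r l
    · obtain ⟨r, hr⟩ := h c (by simp) d (l + 1)
      rw [hr, Option.bind_some]
      exact ih (fun c hc => h c (by simp [hc])) r (l + 1 - 1)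

theorem goA_total {y i : Int} {g : List (Int × List Int)}
    (hsub : pvReach g i ⊆ (g.map (·.1)).toFinset)
    (hstep : pvStep g (pvReach g i) = pvReach g i) :
    ∀ (k : Nat) (n : Int), n ∈ pvReach g i → n ∉ (pvPeel g)^[k] (pvReach g i) →
      ∀ d l, ∃ r, goA y g (k + 1) n d l = some r := by
  intro k
  induction k with
  | zero => intro n hn hq; exact absurd hn hq
  | succ k ih =>
    intro n hn hq d l
    by_cases hnk : n ∈ (pvPeel g)^[k] (pvReach g i)
    · -- n survives k peeling rounds but not k+1: no child of n survives k rounds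
      rw [Function.iterate_succ_apply'] at hq
      have hchild : ∀ c ∈ pvAdj g n, c ∉ (pvPeel g)^[k] (pvReach g i) := by
        intro c hc hck
        apply hq
        rw [mem_pvPeel]
        exact ⟨hnk, c, hc, hck⟩
      obtain ⟨cs, hcs⟩ := pvGet?_of_mem_keys (List.mem_toFinset.mp (hsub hn))
      have hadj : pvAdj g n = cs := by simp [pvAdj, ← pvGet?_eq_lookup, hcs]
      have hrec : ∀ c ∈ cs, ∀ d l, ∃ r, goA y g (k + 1) c d l = some r := by
        intro c hc d l
        have hcadj : c ∈ pvAdj g n := by rw [hadj]; exact hc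
        exact ih c (mem_pvReach_of_adj hstep hn hcadj) (hchild c hcadj) d l
      obtain ⟨p, hp⟩ := loopA_total cs hrec d l
      refine ⟨(if (p.1.map (·.1)).contains n then p.1 else p.1 ++ [(n, p.2)]), ?_⟩
      rw [goA_succ, hcs, Option.bind_some, hp, Option.bind_some]
    · obtain ⟨r, hr⟩ := ih n hn hnk d l
      exact ⟨r, goA_mono_succ _ _ _ _ _ hr⟩

-- ---- simulation: B's stack machine runs A's recursion step for step ----

theorem goB_sim {y : Int} {g : List (Int × List Int)} :
    ∀ (f : Nat) (n : Int) (d : List (Int × Int)) (l : Int) (d' : List (Int × Int)),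
      goA y g f n d l = some d' →
      ∃ k, k ≤ (pvMaxLen g + 2) ^ f ∧
        ∀ rest gg, goB y g (k + gg) ((n, l, false) :: rest) d = goB y g gg rest d' := by
  intro f
  induction f with
  | zero => intro n d l d' h; rw [goA_zero] at h; exact absurd h (by simp)
  | succ f ih =>
    have loopSim : ∀ (gr : Int) (cs : List Int) (d : List (Int × Int)) (l : Int)
        (d2 : List (Int × Int)) (l2 : Int),
        loopA y gr (fun n d' l' => goA y g f n d' l') cs d l = some (d2, l2) →
        l2 = l ∧ ∃ k, k ≤ cs.length * (pvMaxLen g + 2) ^ f ∧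
          ∀ rest gg, goB y g (k + gg)
              (cs.map (fun c => (c, (if gr = y then l + 1 else l), false)) ++ rest) d
            = goB y g gg rest d2 := by
      intro gr cs
      induction cs with
      | nil =>
        intro d l d2 l2 h
        rw [loopA_nil] at h
        injection h with h
        injection h with h1 h2
        subst h1; subst h2
        exact ⟨rfl, 0, Nat.zero_le _, fun rest gg => by simp⟩
      | cons c cs ihc =>
        intro d l d2 l2 h
        rw [loopA_cons] at h
        by_cases hgr : gr = y
        · rw [if_neg (by simp [hgr])] at h
          cases hrec : goA y g f c d (l + 1) with
          | none => rw [hrec] at h; simp at h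
          | some d1 =>
            rw [hrec, Option.bind_some] at h
            have hl1 : l + 1 - 1 = l := by ring
            rw [hl1] at h
            obtain ⟨hl2, k2, hk2, hrun2⟩ := ihc d1 l d2 l2 h
            obtain ⟨k1, hk1, hrun1⟩ := ih c d (l + 1) d1 hrec
            refine ⟨hl2, k1 + k2, ?_, ?_⟩
            · simp only [List.length_cons]
              have he : (cs.length + 1) * (pvMaxLen g + 2) ^ f
                  = (pvMaxLen g + 2) ^ f + cs.length * (pvMaxLen g + 2) ^ f := by ring
              omega
            · intro rest gg
              simp only [List.map_cons, List.cons_append]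
              rw [if_pos hgr]
              have hrun2' := hrun2 rest gg
              rw [if_pos hgr] at hrun2'
              have e1 : k1 + k2 + gg = k1 + (k2 + gg) := by omega
              rw [e1, hrun1, hrun2']
        · rw [if_pos hgr] at h
          cases hrec : goA y g f c d l with
          | none => rw [hrec] at h; simp at h
          | some d1 =>
            rw [hrec, Option.bind_some] at h
            obtain ⟨hl2, k2, hk2, hrun2⟩ := ihc d1 l d2 l2 h
            obtain ⟨k1, hk1, hrun1⟩ := ih c d l d1 hrec
            refine ⟨hl2, k1 + k2, ?_, ?_⟩
            · simp only [List.length_cons]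
              have he : (cs.length + 1) * (pvMaxLen g + 2) ^ f
                  = (pvMaxLen g + 2) ^ f + cs.length * (pvMaxLen g + 2) ^ f := by ring
              omega
            · intro rest gg
              simp only [List.map_cons, List.cons_append]
              rw [if_neg hgr]
              have hrun2' := hrun2 rest gg
              rw [if_neg hgr] at hrun2'
              have e1 : k1 + k2 + gg = k1 + (k2 + gg) := by omega
              rw [e1, hrun1, hrun2']
    intro n d l d' h
    rw [goA_succ] at h
    cases hg : pvGet? g n with
    | none => rw [hg] at h; simp at h
    | some cs =>
      rw [hg, Option.bind_some] at h
      cases hl : loopA y (Int.ofNat cs.length) (fun n d' l' => goA y g f n d' l') cs d l with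
      | none => rw [hl] at h; simp at h
      | some p =>
        rw [hl, Option.bind_some] at h
        injection h with h
        obtain ⟨d2, l2⟩ := p
        obtain ⟨hl2, k, hk, hrun⟩ := loopSim (Int.ofNat cs.length) cs d l d2 l2 hl
        refine ⟨k + 2, ?_, ?_⟩
        · have hlen : cs.length ≤ pvMaxLen g := length_le_pvMaxLen (pvGet?_mem hg)
          have hE : 1 ≤ (pvMaxLen g + 2) ^ f := Nat.one_le_pow _ _ (by omega)
          have h1 : k ≤ pvMaxLen g * (pvMaxLen g + 2) ^ f :=
            le_trans hk (Nat.mul_le_mul_right _ hlen)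
          have h2 : (pvMaxLen g + 2) ^ (f + 1)
              = pvMaxLen g * (pvMaxLen g + 2) ^ f + 2 * (pvMaxLen g + 2) ^ f := by ring
          omega
        · intro rest gg
          have e1 : k + 2 + gg = (k + (1 + gg)) + 1 := by omega
          rw [e1, goB_succ, if_neg (by simp), hg, Option.bind_some, foldl_push,
            hrun ((n, l, true) :: rest) (1 + gg)]
          have e2 : 1 + gg = gg + 1 := by omega
          rw [e2, goB_succ, if_pos rfl, ← h, hl2]

-- ===== VERDICT (by name: the statement is the Claim_ definition above) =====
theorem recFunc4_spec : Claim_equal_recFunc4 := by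
  intro y g i d l _ hpre
  obtain ⟨hsub, hempty⟩ := hpre
  have hstep := pvStep_stab g i
  have hi : i ∈ pvReach g i := subset_iterate_pvStep g (pvN g) {i} (Finset.mem_singleton_self i)
  have hiQ : i ∉ (pvPeel g)^[pvN g] (pvReach g i) := by
    rw [hempty]; exact Finset.notMem_empty i
  obtain ⟨d', hd'⟩ := goA_total (y := y) hsub hstep (pvN g) i hi hiQ d l
  obtain ⟨k, hk, hrun⟩ := goB_sim (pvN g + 1) i d l d' hd'
  have hfb : k ≤ pvFuelB g := hk
  have hfin := hrun [] (pvFuelB g - k)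
  rw [Nat.add_sub_cancel' hfb] at hfin
  unfold Spec_recFunc4 recFunc4 recFunc4_alt
  rw [hd', hfin, goB_nil]
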